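-- pv_equiv track=rewrite | github.com/CvanderStoep/adventofcode2025 | day3.py | largest_digit_and_index
-- ===== SOURCE A (Python) =====
-- def largest_digit_and_index(s):
--     """
--     Find the largest digit in a string and return both the digit and its index.
--
--     Args:
--         s (str): The string to scan.
--
--     Returns:
--         tuple: (largest_digit, index_of_digit)
--                If no digit is found, returns (None, None).
--     """
--     best_digit = None
--     best_index = None
--
--     for i, ch in enumerate(s):
--         if ch.isdigit():
--             # Update if this is the first digit or a larger one
--             if best_digit is None or ch > best_digit:
--                 best_digit = ch
--                 best_index = i
--
--     return best_digit, best_index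
-- ===== SOURCE B (Python) =====
-- def largest_digit_and_index(s):
--     digits = [ch for ch in s if ch.isdigit()]
--     if not digits:
--         return (None, None)
--     best = max(digits)
--     return (best, s.index(best))
-- ===== Notes on version B (the rewrite author's own statement) =====
-- stated objective: simpler
-- what changed: Replaces the fused running-best scan keeping (best_digit, best_index) with a reduce-then-locate decomposition: filter the digits, take max(), then s.index(best) for the first index.
import Mathlib
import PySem

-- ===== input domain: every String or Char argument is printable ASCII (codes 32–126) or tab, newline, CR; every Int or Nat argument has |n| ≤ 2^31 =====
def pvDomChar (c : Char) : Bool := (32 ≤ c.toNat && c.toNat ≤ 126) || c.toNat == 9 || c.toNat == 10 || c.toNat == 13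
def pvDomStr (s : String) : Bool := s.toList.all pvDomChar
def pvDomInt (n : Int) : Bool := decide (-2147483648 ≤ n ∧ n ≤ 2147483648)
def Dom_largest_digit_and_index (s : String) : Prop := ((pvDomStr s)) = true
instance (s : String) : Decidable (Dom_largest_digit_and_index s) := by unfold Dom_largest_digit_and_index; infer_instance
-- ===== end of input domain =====

-- B replaces A's fused running-best scan by filter-digits, max(), then s.index(best); same values, simpler decomposition.

-- ===== PORT A =====
-- the loop body: for i, ch in enumerate(s): if ch.isdigit(): if best is none or ch > best: update
def ldiStep (st : Option Char × Option Int) (p : Int × Char) : Option Char × Option Int :=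
  if PySem.Chars.isdigit p.2 then
    match st.1 with
    | none => (some p.2, some p.1)
    | some b => if b < p.2 then (some p.2, some p.1) else st
  else st

def largest_digit_and_index (s : String) : Option String × Option Int :=
  let r := (PySem.List.enumerate s.toList 0).foldl ldiStep (none, none)
  (r.1.map (fun c => String.ofList [c]), r.2)

-- ===== PORT B =====
def largest_digit_and_index_alt (s : String) : Option String × Option Int :=
  let digits := s.toList.filter PySem.Chars.isdigit
  match PySem.List.max? digits (fun y => y) with
  | none => (none, none)
  | some b => (some (String.ofList [b]), (PySem.List.index? s.toList b).map Int.ofNat)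

-- ===== PRECONDITION & SPEC =====
def Spec_largest_digit_and_index (s : String) (out : Option String × Option Int) : Prop := out = largest_digit_and_index_alt s
instance (s : String) (out : Option String × Option Int) : Decidable (Spec_largest_digit_and_index s out) := by unfold Spec_largest_digit_and_index; infer_instance

-- ===== CLAIM (what is proved, stated in full; the proofs are below) =====
def Claim_equal_largest_digit_and_index : Prop := ∀ (s : String), Dom_largest_digit_and_index s → Spec_largest_digit_and_index s (largest_digit_and_index s)

-- ===== LEMMAS AND PROOFS =====

-- invariant of A's loop, stated over char lists, by reverse induction
theorem ldi_loop_invariant (l : List Char) :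
    (PySem.List.enumerate l 0).foldl ldiStep (none, none) =
      (match PySem.List.max? (l.filter PySem.Chars.isdigit) (fun y => y) with
       | none => (none, none)
       | some b => (some b, (PySem.List.index? l b).map Int.ofNat)) := by
  induction l using List.reverseRecOn with
  | nil => simp [PySem.List.enumerate_nil, PySem.List.max?]
  | append_singleton l c ih =>
    rw [PySem.List.enumerate_append, List.foldl_append, ih, List.filter_append]
    simp only [PySem.List.enumerate_cons, PySem.List.enumerate_nil, List.foldl_cons,
      List.foldl_nil]
    by_cases hd : PySem.Chars.isdigit c
    · simp only [List.filter_cons, List.filter_nil, hd, if_true]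
      cases hm : PySem.List.max? (l.filter PySem.Chars.isdigit) (fun y => y) with
      | none =>
        have hfil : l.filter PySem.Chars.isdigit = [] :=
          (PySem.List.max?_eq_none_iff _ _).mp hm
        have hcnot : c ∉ l := by
          intro hc
          have : c ∈ l.filter PySem.Chars.isdigit := List.mem_filter.mpr ⟨hc, hd⟩
          simp [hfil] at this
        simp only [hfil, List.nil_append, ldiStep, hd, if_true]
        rw [PySem.List.max?_id_cons]
        simp only [List.foldl_nil]
        rw [PySem.List.index?_append_singleton_self _ _ hcnot]
        simp
      | some b =>
        have hbmem : b ∈ l.filter PySem.Chars.isdigit := PySem.List.max?_mem hm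
        have hbl : b ∈ l := (List.mem_filter.mp hbmem).1
        cases hfil : l.filter PySem.Chars.isdigit with
        | nil => rw [hfil] at hm; simp [PySem.List.max?] at hm
        | cons x t =>
          rw [hfil] at hm
          rw [PySem.List.max?_id_cons] at hm
          have hb : t.foldl max x = b := by injection hm
          have hmax2 : PySem.List.max? ((x :: t) ++ [c]) (fun y => y) = some (max b c) := by
            rw [List.cons_append, PySem.List.max?_id_cons, List.foldl_append]
            simp [hb]
          rw [hmax2]
          simp only [ldiStep, hd, if_true]
          by_cases hlt : b < c
          · have hmaxc : max b c = c := max_eq_right hlt.le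
            have hcnot : c ∉ l := by
              intro hc
              have hcf : c ∈ l.filter PySem.Chars.isdigit := List.mem_filter.mpr ⟨hc, hd⟩
              have := PySem.List.max?_isMax (xs := l.filter PySem.Chars.isdigit)
                (key := fun y => y) (by rw [hfil, PySem.List.max?_id_cons, hb]) c hcf
              exact absurd hlt (not_lt.mpr this)
            rw [hmaxc, PySem.List.index?_append_singleton_self _ _ hcnot]
            simp [hlt]
          · rw [max_eq_left (not_lt.mp hlt), PySem.List.index?_append_of_mem _ hbl]
            simp [hlt]
    · simp only [List.filter_cons, List.filter_nil, hd]
      cases hm : PySem.List.max? (l.filter PySem.Chars.isdigit) (fun y => y) with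
      | none => simp [hm, ldiStep, hd]
      | some b =>
        have hbl : b ∈ l := (List.mem_filter.mp (PySem.List.max?_mem hm)).1
        simp only [ldiStep, hd, Bool.false_eq_true, if_false, List.append_nil, hm]
        rw [PySem.List.index?_append_of_mem _ hbl]

theorem largest_digit_and_index_spec : Claim_equal_largest_digit_and_index := by
  intro s _
  unfold Spec_largest_digit_and_index largest_digit_and_index largest_digit_and_index_alt
  rw [ldi_loop_invariant s.toList]
  cases h : PySem.List.max? (s.toList.filter PySem.Chars.isdigit) (fun y => y) <;> simp [h]
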